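-- pv_equiv track=rewrite | github.com/canalqb/teoremas | Teorema_Invariância_da_Dimensão/invariancia_dimensao.py | calcular_intervalos
-- ===== SOURCE A (Python) =====
-- def calcular_intervalos(n_max):
--     tabela = []
--     acumulador = 1  # Valor inicial para N = 0
--
--     for n in range(n_max + 1):
--         inicio = 2 ** n
--         fim = 2 ** (n + 1) - 1
--
--         if n == 0:
--             esperado = 1
--         elif n == 1:
--             esperado = 3
--         elif n == 2:
--             esperado = 7
--         elif n == 3:
--             esperado = 8
--         else:
--             # Heurística: soma acumulativa com fração do intervalo
--             incremento = (fim - inicio) // 2  # aproximação usando metade do intervalo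
--             esperado = acumulador + incremento
--
--         acumulador = esperado
--
--         tabela.append((n, inicio, esperado, fim))
--
--     return tabela
-- ===== SOURCE B (Python) =====
-- def calcular_intervalos(n_max):
--     # each row computed independently via the closed form 2**n - n + 3 (n >= 4)
--     def esperado(n):
--         if n < 3:
--             return 2 ** (n + 1) - 1
--         if n == 3:
--             return 8
--         return 2 ** n - n + 3
--     return [(n, 2 ** n, esperado(n), 2 ** (n + 1) - 1) for n in range(n_max + 1)]
-- ===== Notes on version B (the rewrite author's own statement) =====
-- stated objective: simpler
-- what changed: Replaced the running accumulator recurrence (acumulador carried across loop iterations) by an independent per-row closed form esperado = 2**n - n + 3 for n >= 4 (with 2**(n+1)-1 for n < 3 and 8 for n = 3), so each row is computed without sequential state.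
import Mathlib
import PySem

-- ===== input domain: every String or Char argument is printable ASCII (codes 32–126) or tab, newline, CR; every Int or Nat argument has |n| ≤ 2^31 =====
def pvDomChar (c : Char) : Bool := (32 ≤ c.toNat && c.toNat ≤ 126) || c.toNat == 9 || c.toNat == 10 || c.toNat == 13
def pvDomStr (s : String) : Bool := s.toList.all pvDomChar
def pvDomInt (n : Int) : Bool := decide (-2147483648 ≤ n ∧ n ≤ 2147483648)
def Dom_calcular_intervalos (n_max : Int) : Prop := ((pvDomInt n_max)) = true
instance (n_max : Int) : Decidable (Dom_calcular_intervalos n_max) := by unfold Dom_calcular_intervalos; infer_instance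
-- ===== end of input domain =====

-- B drops A's running accumulator: each row's esperado is an independent closed form (simpler).

-- ===== PORT A =====
-- the loop variable n is always ≥ 0 (it comes from range), so Python's 2 ** n is 2 ^ n.toNat exactly
def calcular_intervalos (n_max : Int) : List (Int × Int × Int × Int) :=
  ((PySem.List.pyRange 0 (n_max + 1) 1).foldl
    (fun (st : List (Int × Int × Int × Int) × Int) n =>
      let tabela := st.1
      let acumulador := st.2
      let inicio : Int := 2 ^ n.toNat
      let fim : Int := 2 ^ (n + 1).toNat - 1
      let esperado : Int :=
        if n = 0 then 1
        else if n = 1 then 3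
        else if n = 2 then 7
        else if n = 3 then 8
        else
          let incremento := PySem.Int.floordiv (fim - inicio) 2
          acumulador + incremento
      (tabela ++ [(n, inicio, esperado, fim)], esperado))
    ([], 1)).1

-- ===== PORT B =====
def pvEsperado (n : Int) : Int :=
  if n < 3 then 2 ^ (n + 1).toNat - 1
  else if n = 3 then 8
  else 2 ^ n.toNat - n + 3

def calcular_intervalos_alt (n_max : Int) : List (Int × Int × Int × Int) :=
  (PySem.List.pyRange 0 (n_max + 1) 1).map
    (fun n => (n, 2 ^ n.toNat, pvEsperado n, 2 ^ (n + 1).toNat - 1))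

-- ===== PRECONDITION & SPEC =====
def Spec_calcular_intervalos (n_max : Int) (out : List (Int × Int × Int × Int)) : Prop := out = calcular_intervalos_alt n_max
instance (n_max : Int) (out : List (Int × Int × Int × Int)) : Decidable (Spec_calcular_intervalos n_max out) := by unfold Spec_calcular_intervalos; infer_instance

-- ===== CLAIM (what is proved, stated in full; the proofs are below) =====
def Claim_equal_calcular_intervalos : Prop := ∀ (n_max : Int), Dom_calcular_intervalos n_max → Spec_calcular_intervalos n_max (calcular_intervalos n_max)

-- ===== LEMMAS AND PROOFS =====

-- abbreviations (proof-side only)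
def pvStep (st : List (Int × Int × Int × Int) × Int) (n : Int) : List (Int × Int × Int × Int) × Int :=
  let tabela := st.1
  let acumulador := st.2
  let inicio : Int := 2 ^ n.toNat
  let fim : Int := 2 ^ (n + 1).toNat - 1
  let esperado : Int :=
    if n = 0 then 1
    else if n = 1 then 3
    else if n = 2 then 7
    else if n = 3 then 8
    else
      let incremento := PySem.Int.floordiv (fim - inicio) 2
      acumulador + incremento
  (tabela ++ [(n, inicio, esperado, fim)], esperado)

def pvRow (n : Int) : Int × Int × Int × Int := (n, 2 ^ n.toNat, pvEsperado n, 2 ^ (n + 1).toNat - 1)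

def pvTable (m : Nat) : List (Int × Int × Int × Int) := (List.range m).map (fun k => pvRow (Int.ofNat k))

lemma pvEsperado_closed (j : Nat) (hj : 3 ≤ j) : pvEsperado (j : Int) = 2 ^ j - (j : Int) + 3 := by
  unfold pvEsperado
  rcases Nat.lt_or_ge j 4 with h | h
  · interval_cases j
    · norm_num
  · have h0 : ¬ ((j : Int) < 3) := by omega
    have h1 : ((j : Int) ≠ 3) := by omega
    have h2 : ((j : Int)).toNat = j := by omega
    simp [h0, h1, h2]

lemma pvEsperado_step (m : Nat) :
    pvStep (pvTable m, if m = 0 then 1 else pvEsperado ((m : Int) - 1)) (m : Int)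
      = (pvTable (m+1), pvEsperado (m : Int)) := by
  rcases Nat.lt_or_ge m 4 with h | h
  · interval_cases m <;> (unfold pvTable; decide)
  · obtain ⟨k, rfl⟩ : ∃ k, m = k + 4 := ⟨m - 4, by omega⟩
    have hm0 : ¬ (k + 4 = 0) := by omega
    have hn0 : ¬ (((k + 4 : Nat) : Int) = 0) := by omega
    have hn1 : ¬ (((k + 4 : Nat) : Int) = 1) := by omega
    have hn2 : ¬ (((k + 4 : Nat) : Int) = 2) := by omega
    have hn3 : ¬ (((k + 4 : Nat) : Int) = 3) := by omega
    have ht1 : (((k + 4 : Nat) : Int)).toNat = k + 4 := by omega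
    have ht2 : (((k + 4 : Nat) : Int) + 1).toNat = k + 5 := by omega
    have hprev : ((k + 4 : Nat) : Int) - 1 = ((k + 3 : Nat) : Int) := by push_cast; ring
    have hacc : pvEsperado (((k + 3 : Nat) : Int)) = 2 ^ (k + 3) - ((k + 3 : Nat) : Int) + 3 :=
      pvEsperado_closed (k + 3) (by omega)
    have hgoal : pvEsperado (((k + 4 : Nat) : Int)) = 2 ^ (k + 4) - ((k + 4 : Nat) : Int) + 3 :=
      pvEsperado_closed (k + 4) (by omega)
    have hfd : PySem.Int.floordiv ((2 : Int) ^ (k + 5) - 1 - 2 ^ (k + 4)) 2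
        = 2 ^ (k + 3) - 1 := by
      rw [PySem.Int.floordiv_eq_ediv_of_pos (by omega)]
      have e1 : (2 : Int) ^ (k + 5) = 2 ^ (k + 3) * 4 := by ring
      have e2 : (2 : Int) ^ (k + 4) = 2 ^ (k + 3) * 2 := by ring
      rw [e1, e2]
      omega
    have hrange : pvTable (k + 4 + 1) = pvTable (k + 4) ++ [pvRow ((k + 4 : Nat) : Int)] := by
      unfold pvTable
      rw [List.range_succ, List.map_append]; rfl
    have harith : (2 : Int) ^ (k + 3) - ((k + 3 : Nat) : Int) + 3 + (2 ^ (k + 3) - 1)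
        = 2 ^ (k + 4) - ((k + 4 : Nat) : Int) + 3 := by push_cast; ring
    rw [hrange]
    simp only [pvStep, pvRow, hm0, hn0, hn1, hn2, hn3, if_false, ht1, ht2, hprev, hacc, hfd, hgoal]
    rw [harith]

lemma pvLoopInv (m : Nat) :
    ((PySem.List.pyRange 0 (m : Int) 1).foldl pvStep ([], 1))
      = (pvTable m, if m = 0 then 1 else pvEsperado ((m : Int) - 1)) := by
  induction m with
  | zero => simp [PySem.List.pyRange_one_eq_nil, pvTable]
  | succ m ih =>
    have h : PySem.List.pyRange 0 ((m : Int) + 1) 1 = PySem.List.pyRange 0 (m : Int) 1 ++ [(m : Int)] :=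
      PySem.List.pyRange_one_succ_right (by positivity)
    have hcast : (((m + 1 : Nat)) : Int) = (m : Int) + 1 := by push_cast; ring
    rw [hcast, h, List.foldl_append, ih]
    simp only [List.foldl]
    rw [pvEsperado_step m]
    simp

lemma pvPortA_eq_foldl (n_max : Int) :
    calcular_intervalos n_max = ((PySem.List.pyRange 0 (n_max + 1) 1).foldl pvStep ([], 1)).1 := rfl

theorem calcular_intervalos_spec : Claim_equal_calcular_intervalos := by
  intro n_max _
  unfold Spec_calcular_intervalos calcular_intervalos_alt
  rw [pvPortA_eq_foldl]
  rcases Int.lt_or_le n_max 0 with h | h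
  · rw [PySem.List.pyRange_one_eq_nil (by omega)]
    rfl
  · obtain ⟨m, hm⟩ : ∃ m : Nat, n_max + 1 = (m : Int) := ⟨(n_max + 1).toNat, by omega⟩
    rw [hm, pvLoopInv m, PySem.List.pyRange_one]
    unfold pvTable pvRow
    simp
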